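-- pv_equiv track=rewrite | github.com/TerrelVerneuil/resume_parser | app.py | extract_skills_section
-- ===== SOURCE A (Python) =====
-- def extract_skills_section(text):
--     # This function extracts the skills section from the resume text
--     skill_keywords = ["skills", "expertise", "proficiencies", "technologies", "competencies"]
--     lines = text.split('\n')
--     skills_text = ""
--     recording = False
--     for line in lines:
--         if any(keyword in line.lower() for keyword in skill_keywords):
--             recording = True
--             skills_text += line + " "
--         elif recording and line.strip() == "":
--             break
--         elif recording:
--             skills_text += line + " "
--     return skills_text.strip()
-- ===== SOURCE B (Python) =====
-- def extract_skills_section(text):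
--     # Different decomposition: drop lines up to the first keyword line, cut the
--     # following block at the first blank line, and join once at the end.
--     skill_keywords = ["skills", "expertise", "proficiencies", "technologies", "competencies"]
--     lines = text.split('\n')
--     rest = lines
--     while rest and not any(keyword in rest[0].lower() for keyword in skill_keywords):
--         rest = rest[1:]
--     if not rest:
--         return ""
--     parts = [rest[0]]
--     for line in rest[1:]:
--         if line.strip() == "":
--             break
--         parts.append(line)
--     return " ".join(parts).strip()
-- ===== Notes on version B (the rewrite author's own statement) =====
-- stated objective: alternative
-- what changed: Replaces A's single pass with a recording flag and incremental string concatenation by a three-phase decomposition: drop lines up to the first keyword line, take the following lines until the first blank line, then join the collected lines once and strip.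
import Mathlib
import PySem

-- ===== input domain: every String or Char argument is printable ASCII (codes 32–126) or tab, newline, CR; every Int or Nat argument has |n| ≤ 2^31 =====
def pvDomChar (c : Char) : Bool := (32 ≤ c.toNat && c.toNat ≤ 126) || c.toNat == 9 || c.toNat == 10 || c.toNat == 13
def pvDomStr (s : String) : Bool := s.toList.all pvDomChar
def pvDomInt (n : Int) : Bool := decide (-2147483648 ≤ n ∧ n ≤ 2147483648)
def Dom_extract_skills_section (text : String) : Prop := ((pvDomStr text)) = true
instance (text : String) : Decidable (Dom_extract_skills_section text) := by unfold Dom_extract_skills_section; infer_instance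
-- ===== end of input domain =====

-- B replaces A's recording-flag single pass by drop-to-keyword / take-until-blank / join-once (objective: alternative decomposition, same cost).

-- ===== PORT A =====
def pvKeywords : List (List Char) :=
  ["skills".toList, "expertise".toList, "proficiencies".toList, "technologies".toList, "competencies".toList]

def pvHasKW (line : List Char) : Bool :=
  pvKeywords.any (fun k => PySem.Chars.isIn k (PySem.Chars.lower line))

-- the for-loop of A: state = (skills_text, recording); 'break' returns the accumulator
def pvLoopA : List (List Char) → List Char → Bool → List Char
  | [], acc, _ => acc
  | l :: ls, acc, recording =>
    if pvHasKW l then pvLoopA ls (acc ++ l ++ [' ']) true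
    else if recording && (PySem.Chars.strip l == []) then acc
    else if recording then pvLoopA ls (acc ++ l ++ [' ']) recording
    else pvLoopA ls acc recording

def extract_skills_section (text : String) : String :=
  let lines := PySem.Chars.splitOn text.toList ['\n']
  String.ofList (PySem.Chars.strip (pvLoopA lines [] false))

-- ===== PORT B =====
-- the while-loop of B: drop lines until the first keyword line
def pvDropToKW : List (List Char) → List (List Char)
  | [] => []
  | l :: ls => if pvHasKW l then l :: ls else pvDropToKW ls

def pvNB (ln : List Char) : Bool := !(PySem.Chars.strip ln == [])

def extract_skills_section_alt (text : String) : String :=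
  let lines := PySem.Chars.splitOn text.toList ['\n']
  match pvDropToKW lines with
  | [] => ""
  | first :: block =>
    -- B's for-loop with break = collect the lines until the first blank one
    let parts := first :: block.takeWhile pvNB
    String.ofList (PySem.Chars.strip (PySem.Chars.join [' '] parts))

-- ===== PRECONDITION & SPEC =====
def Spec_extract_skills_section (text : String) (out : String) : Prop := out = extract_skills_section_alt text
instance (text : String) (out : String) : Decidable (Spec_extract_skills_section text out) := by unfold Spec_extract_skills_section; infer_instance

-- ===== CLAIM (what is proved, stated in full; the proofs are below) =====
def Claim_equal_extract_skills_section : Prop := ∀ (text : String), Dom_extract_skills_section text → Spec_extract_skills_section text (extract_skills_section text)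

-- ===== LEMMAS AND PROOFS =====
-- proof-only helper: what A's recording phase appends for a list of collected lines
def pvFold (ts : List (List Char)) : List Char := ts.foldr (fun t r => t ++ ' ' :: r) []

lemma pv_strip_nil_all_space {l : List Char} (h : PySem.Chars.strip l = []) :
    ∀ c ∈ l, PySem.Chars.isspace c = true := by
  intro c hc
  have hm : ∀ c ∈ PySem.Chars.lstrip l, PySem.Chars.isspace c = true := by
    intro c hc
    have := h
    simp [PySem.Chars.strip, PySem.Chars.rstrip, List.dropWhile_eq_nil_iff] at this
    exact this c (by simpa using hc)
  have hl : l = l.takeWhile PySem.Chars.isspace ++ PySem.Chars.lstrip l := by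
    simp [PySem.Chars.lstrip]
  rw [hl] at hc
  rcases List.mem_append.mp hc with h1 | h2
  · exact List.mem_takeWhile_imp h1
  · exact hm c h2

lemma pv_space_not_upper {c : Char} (hsp : PySem.Chars.isspace c = true) :
    PySem.Chars.isupper c = false := by
  simp only [PySem.Chars.isspace, decide_eq_true_eq, Bool.or_eq_true, Bool.and_eq_true] at hsp
  simp only [PySem.Chars.isupper, Bool.and_eq_false_iff, decide_eq_false_iff_not, Char.le_def,
    UInt32.le_iff_toNat_le]
  have hA : 'A'.val.toNat = 65 := rfl
  have hZ : 'Z'.val.toNat = 90 := rfl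
  simp only [Char.toNat] at hsp ⊢
  omega

-- no character of an all-whitespace line can lower to a non-whitespace character
lemma pv_aux_space {l : List Char} (hall : ∀ c ∈ l, PySem.Chars.isspace c = true)
    {c0 : Char} (h0 : PySem.Chars.isspace c0 = false)
    (hmem : c0 ∈ PySem.Chars.lower l) : False := by
  rw [PySem.Chars.lower, List.mem_map] at hmem
  obtain ⟨c, hc, hlc⟩ := hmem
  have hsp := hall c hc
  rw [PySem.Chars.lowerChar, pv_space_not_upper hsp] at hlc
  simp at hlc
  subst hlc
  rw [hsp] at h0
  simp at h0

lemma pv_blank_not_kw {l : List Char} (h : PySem.Chars.strip l = []) : pvHasKW l = false := by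
  have hall := pv_strip_nil_all_space h
  by_contra hkw
  rw [Bool.not_eq_false, pvHasKW, List.any_eq_true] at hkw
  obtain ⟨k, hk, hin⟩ := hkw
  rw [PySem.Chars.isIn_iff_infix] at hin
  fin_cases hk
  · exact pv_aux_space hall (c0 := 's') (by decide) (hin.subset (by decide))
  · exact pv_aux_space hall (c0 := 'e') (by decide) (hin.subset (by decide))
  · exact pv_aux_space hall (c0 := 'p') (by decide) (hin.subset (by decide))
  · exact pv_aux_space hall (c0 := 't') (by decide) (hin.subset (by decide))
  · exact pv_aux_space hall (c0 := 'c') (by decide) (hin.subset (by decide))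

lemma pv_kw_not_blank {l : List Char} (h : pvHasKW l = true) : pvNB l = true := by
  rw [pvNB, Bool.not_eq_eq_eq_not, Bool.not_true, beq_eq_false_iff_ne]
  intro hb
  rw [pv_blank_not_kw hb] at h
  exact Bool.false_ne_true h

lemma pv_loopA_record (ls : List (List Char)) :
    ∀ acc, pvLoopA ls acc true = acc ++ pvFold (ls.takeWhile pvNB) := by
  induction ls with
  | nil => intro acc; simp [pvLoopA, pvFold]
  | cons l ls ih =>
    intro acc
    by_cases hkw : pvHasKW l = true
    · rw [pvLoopA]
      simp only [hkw, if_true]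
      rw [ih, List.takeWhile_cons_of_pos (pv_kw_not_blank hkw)]
      simp [pvFold]
    · rw [pvLoopA]
      simp only [hkw]
      by_cases hb : PySem.Chars.strip l = []
      · have : pvNB l = false := by simp [pvNB, hb]
        simp [hb, List.takeWhile_cons_of_neg, this, pvFold]
      · have hnb : pvNB l = true := by simp [pvNB, hb]
        have : (PySem.Chars.strip l == []) = false := by simp [hb]
        simp only [Bool.false_eq_true, if_false, this, Bool.true_and, if_true]
        rw [ih, List.takeWhile_cons_of_pos hnb]
        simp [pvFold]

lemma pv_loopA_main (lines : List (List Char)) :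
    pvLoopA lines [] false =
      (match pvDropToKW lines with
       | [] => []
       | f :: blk => pvFold (f :: blk.takeWhile pvNB)) := by
  induction lines with
  | nil => simp [pvLoopA, pvDropToKW]
  | cons l ls ih =>
    by_cases hkw : pvHasKW l = true
    · rw [pvLoopA]
      simp only [hkw, if_true]
      rw [pv_loopA_record]
      simp [pvDropToKW, hkw, pvFold]
    · rw [pvLoopA]
      simp only [hkw, Bool.false_and, if_false, Bool.false_eq_true]
      rw [ih]
      simp [pvDropToKW, hkw]

lemma pv_fold_join (f : List Char) (parts : List (List Char)) :
    pvFold (f :: parts) = PySem.Chars.join [' '] (f :: parts) ++ [' '] := by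
  induction parts generalizing f with
  | nil => simp [pvFold, PySem.Chars.join_singleton]
  | cons q rest ih =>
    have : pvFold (f :: q :: rest) = f ++ ' ' :: pvFold (q :: rest) := by simp [pvFold]
    rw [this, ih q, PySem.Chars.join_cons_cons]
    simp

lemma pv_strip_append_space (x : List Char) :
    PySem.Chars.strip (x ++ [' ']) = PySem.Chars.strip x := by
  rw [PySem.Chars.strip, PySem.Chars.strip, PySem.Chars.lstrip, PySem.Chars.lstrip,
    List.dropWhile_append]
  by_cases h : (List.dropWhile PySem.Chars.isspace x).isEmpty = true
  · have hx : List.dropWhile PySem.Chars.isspace x = [] := by simpa using h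
    simp [hx, PySem.Chars.rstrip, PySem.Chars.isspace]
  · simp only [h, if_false, Bool.false_eq_true]
    rw [PySem.Chars.rstrip, PySem.Chars.rstrip]
    simp [PySem.Chars.isspace]

-- ===== VERDICT (by name: the statement is the Claim_ definition above) =====
theorem extract_skills_section_spec : Claim_equal_extract_skills_section := by
  intro text _
  unfold Spec_extract_skills_section extract_skills_section extract_skills_section_alt
  simp only []
  rw [pv_loopA_main]
  cases h : pvDropToKW (PySem.Chars.splitOn text.toList ['\n']) with
  | nil => rfl
  | cons f blk =>
    dsimp only
    rw [pv_fold_join, pv_strip_append_space]
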